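-- pv_equiv track=rewrite | github.com/jtvanlew/pelican-blog-2025 | md-to-rst-converter.py | convert_md_to_rst
-- ===== SOURCE A (Python) =====
-- def convert_md_to_rst(md_content):
--     lines = md_content.split('\n')
--     rst_content = []
--     for line in lines:
--         if line.startswith('Title:'):
--             rst_content.append(line.replace('Title:', ":title:"))
--         elif line.startswith('Category:'):
--             rst_content.append(line.replace('Category:', ":category:"))
--         elif line.startswith('Author:'):
--             rst_content.append(line.replace('Author:', ":author:"))
--         elif line.startswith('Summary:'):
--             rst_content.append(line.replace('Summary:', ":summary:"))
--         elif line.startswith('Date:'):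
--             rst_content.append(line.replace('Date:', ":date:"))
--         elif line.startswith('Tags:'):
--             rst_content.append(line.replace('Tags:', ":tags:"))
--         elif line.startswith('Category:'):
--             rst_content.append(line.replace('Category:', ":category:"))
--         elif line.startswith('image:'):
--             rst_content.append(line.replace('{filename}..\\', '{filename}../'))
--         elif line.startswith('!['):
--             alt_text = line.split('[')[1].split(']')[0]
--             image_path = line.split('(')[1].split(')')[0]
--             rst_content.append(f'.. image:: {image_path}')
--             rst_content.append(f'   :alt: {alt_text}')
--             rst_content.append('   :class: img-responsive')
--         elif line.startswith('# '):
--             rst_content.append(line[2:])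
--             rst_content.append('=' * len(line[2:]))
--         elif line.startswith('## '):
--             rst_content.append(line[3:])
--             rst_content.append('-' * len(line[3:]))
--         elif line.startswith('### '):
--             rst_content.append(line[4:])
--             rst_content.append('~' * len(line[4:]))
--         elif line.startswith('#### '):
--             rst_content.append(line[5:])
--             rst_content.append('^' * len(line[5:]))
--         elif line.startswith('##### '):
--             rst_content.append(line[6:])
--             rst_content.append('"' * len(line[6:]))
--         else:
--             rst_content.append(line)
--     return '\n'.join(rst_content)
-- ===== SOURCE B (Python) =====
-- _META = (('Title:', ':title:'), ('Category:', ':category:'), ('Author:', ':author:'),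
--          ('Summary:', ':summary:'), ('Date:', ':date:'), ('Tags:', ':tags:'))
--
-- _UNDERLINE = '=-~^"'
--
--
-- def _upto(s, stops):
--     out = ''
--     for ch in s:
--         if ch in stops:
--             break
--         out += ch
--     return out
--
--
-- def _render(line):
--     for prefix, repl in _META:
--         if line.startswith(prefix):
--             return line.replace(prefix, repl)
--     if line.startswith('image:'):
--         return line.replace('{filename}..\\', '{filename}../')
--     if line.startswith('!['):
--         alt = _upto(line[2:], '[]')
--         path = _upto(line[line.find('(') + 1:], '()')
--         return '.. image:: ' + path + '\n   :alt: ' + alt + '\n   :class: img-responsive'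
--     c = 0
--     for ch in line:
--         if ch != '#':
--             break
--         c += 1
--     if 1 <= c <= 5 and c < len(line) and line[c] == ' ':
--         body = line[c + 1:]
--         return body + '\n' + _UNDERLINE[c - 1] * len(body)
--     return line
--
--
-- def convert_md_to_rst(md_content):
--     # streaming scan: find each newline in the raw string, render the line in
--     # place, and grow the output string directly -- no split(), no list, no join()
--     out = ''
--     rest = md_content
--     while True:
--         i = rest.find('\n')
--         if i < 0:
--             return out + _render(rest)
--         out = out + _render(rest[:i]) + '\n'
--         rest = rest[i + 1:]
-- ===== Notes on version B (the rewrite author's own statement) =====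
-- stated objective: alternative
-- what changed: B drops A's split/list-accumulator/join skeleton entirely: it scans the raw string for each newline with str.find, renders the line in place into a directly grown output string, and replaces the six metadata branches by one prefix table and the five heading branches by counting the leading hash marks against an underline-character table.
-- outside the precondition, e.g. on convert_md_to_rst('!['): A raises IndexError, B returns '.. image:: ![\n   :alt: \n   :class: img-responsive'
import Mathlib
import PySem

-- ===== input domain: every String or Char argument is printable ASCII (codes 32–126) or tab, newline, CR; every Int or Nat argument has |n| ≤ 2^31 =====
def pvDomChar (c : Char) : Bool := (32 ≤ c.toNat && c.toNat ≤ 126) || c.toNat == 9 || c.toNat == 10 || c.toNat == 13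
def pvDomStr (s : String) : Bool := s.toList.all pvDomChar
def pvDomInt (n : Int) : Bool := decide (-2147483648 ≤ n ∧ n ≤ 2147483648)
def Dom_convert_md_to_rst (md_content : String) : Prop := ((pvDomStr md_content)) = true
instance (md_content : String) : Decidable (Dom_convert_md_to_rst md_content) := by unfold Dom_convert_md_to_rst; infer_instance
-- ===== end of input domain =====

-- B replaces A's split / list-accumulator / join skeleton by a streaming scan of the raw string
-- (find the next newline, render that line, grow the output string directly), with a prefix table
-- for the metadata lines and a leading-hash count for the headings (objective: alternative).

-- ===== PORT A =====
-- line-by-line body of A's for-loop (works on List Char; PySem.Str functions are thin wrappers over these)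
def pvLineA (cs : List Char) : List (List Char) :=
  if PySem.Chars.startswith cs "Title:".toList then
    [PySem.Chars.replace cs "Title:".toList ":title:".toList]
  else if PySem.Chars.startswith cs "Category:".toList then
    [PySem.Chars.replace cs "Category:".toList ":category:".toList]
  else if PySem.Chars.startswith cs "Author:".toList then
    [PySem.Chars.replace cs "Author:".toList ":author:".toList]
  else if PySem.Chars.startswith cs "Summary:".toList then
    [PySem.Chars.replace cs "Summary:".toList ":summary:".toList]
  else if PySem.Chars.startswith cs "Date:".toList then
    [PySem.Chars.replace cs "Date:".toList ":date:".toList]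
  else if PySem.Chars.startswith cs "Tags:".toList then
    [PySem.Chars.replace cs "Tags:".toList ":tags:".toList]
  else if PySem.Chars.startswith cs "Category:".toList then   -- A's (unreachable) duplicate branch, kept
    [PySem.Chars.replace cs "Category:".toList ":category:".toList]
  else if PySem.Chars.startswith cs "image:".toList then
    [PySem.Chars.replace cs "{filename}..\\".toList "{filename}../".toList]
  else if PySem.Chars.startswith cs "![".toList then
    -- alt_text = line.split('[')[1].split(']')[0]; image_path = line.split('(')[1].split(')')[0]
    -- (the [1] indexing raises IndexError when '(' is absent: that input is excluded by Pre_)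
    let alt := (((PySem.Chars.split? ((PySem.List.pyGet? ((PySem.Chars.split? cs "[".toList).getD []) 1).getD []) "]".toList).getD []).headD [])
    let path := (((PySem.Chars.split? ((PySem.List.pyGet? ((PySem.Chars.split? cs "(".toList).getD []) 1).getD []) ")".toList).getD []).headD [])
    [".. image:: ".toList ++ path, "   :alt: ".toList ++ alt, "   :class: img-responsive".toList]
  else if PySem.Chars.startswith cs "# ".toList then
    let b := PySem.Chars.slice cs (some 2) none
    [b, List.replicate b.length '=']
  else if PySem.Chars.startswith cs "## ".toList then
    let b := PySem.Chars.slice cs (some 3) none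
    [b, List.replicate b.length '-']
  else if PySem.Chars.startswith cs "### ".toList then
    let b := PySem.Chars.slice cs (some 4) none
    [b, List.replicate b.length '~']
  else if PySem.Chars.startswith cs "#### ".toList then
    let b := PySem.Chars.slice cs (some 5) none
    [b, List.replicate b.length '^']
  else if PySem.Chars.startswith cs "##### ".toList then
    let b := PySem.Chars.slice cs (some 6) none
    [b, List.replicate b.length '"']
  else [cs]

def convert_md_to_rst (md_content : String) : String :=
  String.ofList (PySem.Chars.join "\n".toList
    (((PySem.Chars.split? md_content.toList "\n".toList).getD []).foldl
      (fun acc l => acc ++ pvLineA l) []))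

-- ===== PORT B =====
def pvMetaTable : List (List Char × List Char) :=
  [("Title:".toList, ":title:".toList), ("Category:".toList, ":category:".toList),
   ("Author:".toList, ":author:".toList), ("Summary:".toList, ":summary:".toList),
   ("Date:".toList, ":date:".toList), ("Tags:".toList, ":tags:".toList)]

def pvUnderline : List Char := "=-~^\"".toList

-- Source B's leading-'#' counting loop
def pvHashCount : List Char → Nat
  | [] => 0
  | c :: rest => if c = '#' then pvHashCount rest + 1 else 0

-- Source B's _upto loop (collect chars until one of `stops` appears)
def pvUpto (stops : List Char) : List Char → List Char
  | [] => []
  | c :: rest => if c ∈ stops then [] else c :: pvUpto stops rest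

-- Source B's _render: the rst text for ONE line, multi-line output joined with '\n' in place
def pvRender (cs : List Char) : List Char :=
  match pvMetaTable.find? (fun pr => PySem.Chars.startswith cs pr.1) with
  | some pr => PySem.Chars.replace cs pr.1 pr.2
  | none =>
    if PySem.Chars.startswith cs "image:".toList then
      PySem.Chars.replace cs "{filename}..\\".toList "{filename}../".toList
    else if PySem.Chars.startswith cs "![".toList then
      let alt := pvUpto "[]".toList (cs.drop 2)
      let path := pvUpto "()".toList (cs.drop (PySem.Chars.find cs "(".toList + 1).toNat)
      ".. image:: ".toList ++ path ++ "\n   :alt: ".toList ++ alt ++ "\n   :class: img-responsive".toList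
    else
      let c := pvHashCount cs
      if 1 ≤ c ∧ c ≤ 5 ∧ cs[c]? = some ' ' then
        let body := cs.drop (c + 1)
        body ++ '\n' :: List.replicate body.length (pvUnderline.getD (c - 1) '=')
      else cs

-- spec of the hand-written scanner PySem.Chars.find.go, needed for pvGo's termination
theorem pvFind_go_spec (d : Char) (l : List Char) :
    ∀ (k : Nat), PySem.Chars.find.go [d] l k =
      if d ∈ l then ((k : Int) + (l.takeWhile (· ≠ d)).length) else -1 := by
  induction l with
  | nil => intro k; rw [PySem.Chars.find.go]; simp
  | cons c t ih =>
    intro k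
    rw [PySem.Chars.find.go]
    by_cases hc : c = d
    · subst hc
      simp [List.isPrefixOf]
    · have hp : ([d].isPrefixOf (c :: t)) = false := by
        simp [List.isPrefixOf]
        intro hh
        exact hc hh.symm
      rw [hp]
      simp only [Bool.false_eq_true, if_false]
      rw [ih (k + 1)]
      simp [List.takeWhile_cons, hc, Ne.symm hc]
      by_cases hm : d ∈ t
      · simp [hm]; push_cast; ring
      · simp [hm]

theorem pvFind_mem (d : Char) (cs : List Char) (h : ¬ PySem.Chars.find cs [d] < 0) : d ∈ cs := by
  by_contra hm
  rw [PySem.Chars.find, pvFind_go_spec, if_neg hm] at h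
  omega

-- termination of pvGo: the rest after the found newline is strictly shorter
theorem pvGoDec (cs : List Char) (h : ¬ PySem.Chars.find cs ['\n'] < 0) :
    (PySem.Chars.slice cs (some (PySem.Chars.find cs ['\n'] + 1)) none).length < cs.length := by
  have hmem : '\n' ∈ cs := pvFind_mem '\n' cs h
  have hpos : 0 < cs.length := List.length_pos_of_mem hmem
  rw [PySem.Chars.slice_eq_listSlice, PySem.List.slice_from cs (by omega)]
  have : 1 ≤ (PySem.Chars.find cs ['\n'] + 1).toNat := by omega
  simp only [List.length_drop]
  omega

-- Source B's while-loop over the raw string: find the next '\n', render rest[:i], recurse on rest[i+1:]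
def pvGo (out cs : List Char) : List Char :=
  if PySem.Chars.find cs "\n".toList < 0 then out ++ pvRender cs
  else pvGo (out ++ pvRender (PySem.Chars.slice cs none (some (PySem.Chars.find cs "\n".toList))) ++ "\n".toList)
            (PySem.Chars.slice cs (some (PySem.Chars.find cs "\n".toList + 1)) none)
  termination_by cs.length
  decreasing_by exact pvGoDec cs (by assumption)

def convert_md_to_rst_alt (md_content : String) : String :=
  String.ofList (pvGo [] md_content.toList)

-- ===== PRECONDITION & SPEC =====
-- Pre_ excludes exactly the inputs on which A raises IndexError: a markdown-image line ('![' start)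
-- with no opening parenthesis makes A's indexing [1] into the split raise.
def Pre_convert_md_to_rst (md_content : String) : Prop :=
  ∀ l ∈ (PySem.Chars.split? md_content.toList "\n".toList).getD [],
    PySem.Chars.startswith l "![".toList = true → '(' ∈ l
instance (md_content : String) : Decidable (Pre_convert_md_to_rst md_content) := by
  unfold Pre_convert_md_to_rst; infer_instance

def pvWitness_convert_md_to_rst : String := "Title: a\n# Hi\n![x](y.png)\nplain"

def Spec_convert_md_to_rst (md_content : String) (out : String) : Prop := out = convert_md_to_rst_alt md_content
instance (md_content : String) (out : String) : Decidable (Spec_convert_md_to_rst md_content out) := by unfold Spec_convert_md_to_rst; infer_instance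

-- ===== CLAIM (what is proved, stated in full; the proofs are below) =====
def Claim_equal_convert_md_to_rst : Prop := ∀ (md_content : String), Dom_convert_md_to_rst md_content → Pre_convert_md_to_rst md_content → Spec_convert_md_to_rst md_content (convert_md_to_rst md_content)

-- ===== LEMMAS AND PROOFS =====

def pvPieces (d : Char) (cs : List Char) : List (List Char) :=
  cs.takeWhile (· ≠ d) ::
    (if (cs.dropWhile (· ≠ d)) = [] then [] else pvPieces d (cs.dropWhile (· ≠ d)).tail)
  termination_by cs.length
  decreasing_by
    have h1 := List.length_dropWhile_le (fun c => decide (c ≠ d)) cs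
    rename_i h
    have h2 : 0 < (cs.dropWhile (fun c => decide (c ≠ d))).length := List.length_pos_of_ne_nil h
    simp only [List.length_tail]
    omega

theorem pvPieces_nil (d : Char) : pvPieces d [] = [[]] := by rw [pvPieces]; simp

theorem pvPieces_cons_self (d : Char) (t : List Char) :
    pvPieces d (d :: t) = [] :: pvPieces d t := by
  rw [pvPieces]
  simp [List.dropWhile_cons]

theorem pvPieces_cons_ne (d c : Char) (t : List Char) (h : c ≠ d) :
    pvPieces d (c :: t) = (pvPieces d t).modifyHead (c :: ·) := by
  conv_lhs => rw [pvPieces]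
  conv_rhs => rw [pvPieces]
  simp [List.takeWhile_cons, List.dropWhile_cons, h]

theorem pvPieces_ne_nil (d : Char) (cs : List Char) : pvPieces d cs ≠ [] := by
  rw [pvPieces]; simp

theorem pvSplitOn_go_spec (d : Char) (fuel : Nat) :
    ∀ (l cur : List Char) (accs : List (List Char)), l.length < fuel →
      PySem.Chars.splitOn.go [d] fuel l cur accs =
        accs.reverse ++ (pvPieces d l).modifyHead (cur.reverse ++ ·) := by
  induction fuel with
  | zero => intro l cur accs h; omega
  | succ n ih =>
    intro l cur accs h
    match l with
    | [] =>
      rw [PySem.Chars.splitOn.go]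
      simp [pvPieces_nil]
      omega
    | c :: rest =>
      rw [PySem.Chars.splitOn.go]
      by_cases hc : c = d
      · subst hc
        simp only [List.isPrefixOf, BEq.rfl, Bool.true_and, if_pos]
        have hd : List.drop [c].length (c :: rest) = rest := rfl
        rw [hd, ih rest [] _ (by simpa using h)]
        simp [pvPieces_cons_self]
        cases pvPieces c rest <;> simp
      · have : ¬ ([d].isPrefixOf (c :: rest) = true) := by
          simp [List.isPrefixOf]
          intro hh
          exact hc hh.symm
        rw [if_neg this]
        rw [ih rest (c :: cur) _ (by simpa using h)]
        rw [pvPieces_cons_ne d c rest hc]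
        cases hp : pvPieces d rest with
        | nil => exact absurd hp (pvPieces_ne_nil d rest)
        | cons a t => simp

theorem pvSplitOn_eq_pieces (d : Char) (cs : List Char) :
    PySem.Chars.splitOn cs [d] = pvPieces d cs := by
  rw [PySem.Chars.splitOn, pvSplitOn_go_spec d (cs.length + 1) cs [] [] (by omega)]
  cases hp : pvPieces d cs with
  | nil => exact absurd hp (pvPieces_ne_nil d cs)
  | cons a t => simp

theorem pvFind_eq (d : Char) (cs : List Char) :
    PySem.Chars.find cs [d] = if d ∈ cs then ((cs.takeWhile (· ≠ d)).length : Int) else -1 := by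
  rw [PySem.Chars.find, pvFind_go_spec]
  simp

theorem pvDrop_find_succ (d : Char) (cs : List Char) (h : d ∈ cs) :
    cs.drop (PySem.Chars.find cs [d] + 1).toNat = (cs.dropWhile (· ≠ d)).tail := by
  rw [pvFind_eq, if_pos h]
  have h2 : (((cs.takeWhile (· ≠ d)).length : Int) + 1).toNat
      = (cs.takeWhile (· ≠ d)).length + 1 := by omega
  rw [h2]
  conv_lhs => rw [← List.takeWhile_append_dropWhile (p := (fun c => decide (c ≠ d))) (l := cs)]
  rw [List.drop_append]
  simp [List.drop_one]

theorem pvTake_find (d : Char) (cs : List Char) (h : d ∈ cs) :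
    cs.take (PySem.Chars.find cs [d]).toNat = cs.takeWhile (· ≠ d) := by
  rw [pvFind_eq, if_pos h]
  simp only [Int.toNat_natCast]
  exact ((List.prefix_iff_eq_take).mp (List.takeWhile_prefix _)).symm

theorem pvUpto_eq (a b : Char) (xs : List Char) :
    (xs.takeWhile (· ≠ a)).takeWhile (· ≠ b) = pvUpto [a, b] xs := by
  induction xs with
  | nil => simp [pvUpto]
  | cons c t ih =>
    by_cases hca : c = a
    · subst hca; simp [pvUpto, List.takeWhile_cons]
    · by_cases hcb : c = b
      · subst hcb; simp [pvUpto, List.takeWhile_cons, hca]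
      · simp [pvUpto, List.takeWhile_cons, hca, hcb]
        simpa using ih

theorem pvHeading_iff (k : Nat) : ∀ (cs : List Char),
    PySem.Chars.startswith cs (List.replicate k '#' ++ [' ']) = true ↔
      (pvHashCount cs = k ∧ cs[k]? = some ' ') := by
  induction k with
  | zero =>
    intro cs
    cases cs with
    | nil => simp [PySem.Chars.startswith, List.isPrefixOf]
    | cons c t =>
      simp [PySem.Chars.startswith, List.isPrefixOf, pvHashCount]
      constructor
      · intro hh; subst hh; simp
      · rintro ⟨h1, h2⟩
        exact h2.symm
  | succ n ih =>
    intro cs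
    cases cs with
    | nil => simp [PySem.Chars.startswith, List.isPrefixOf]
    | cons c t =>
      rw [List.replicate_succ]
      by_cases hc : c = '#'
      · subst hc
        have he : PySem.Chars.startswith ('#' :: t) (('#' :: List.replicate n '#') ++ [' '])
            = PySem.Chars.startswith t (List.replicate n '#' ++ [' ']) := by
          simp [PySem.Chars.startswith, List.isPrefixOf]
        rw [he, ih t]
        simp [pvHashCount]
      · have h1 : PySem.Chars.startswith (c :: t) ('#' :: (List.replicate n '#' ++ [' ']))
            = false := by
          simp [PySem.Chars.startswith, List.isPrefixOf]
          intro hh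
          exact absurd hh.symm hc
        simp [h1, pvHashCount, hc]

theorem pvPieces_headD (d : Char) (cs : List Char) :
    (pvPieces d cs).headD [] = cs.takeWhile (· ≠ d) := by
  rw [pvPieces]; simp

theorem pvDropWhile_ne_nil (d : Char) (cs : List Char) (h : d ∈ cs) :
    cs.dropWhile (· ≠ d) ≠ [] := by
  simp only [ne_eq, List.dropWhile_eq_nil_iff]
  intro hall
  have := hall d h
  simp at this

theorem pvPieces_get0 (d : Char) (cs : List Char) :
    (pvPieces d cs)[0]? = some (cs.takeWhile (· ≠ d)) := by
  cases hp : pvPieces d cs with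
  | nil => exact absurd hp (pvPieces_ne_nil d cs)
  | cons a t =>
    have hh := pvPieces_headD d cs
    rw [hp] at hh
    simp at hh
    simp [hh]

theorem pvPieces_get1 (d : Char) (cs : List Char) (h : d ∈ cs) :
    (pvPieces d cs)[1]? =
      some ((cs.dropWhile (· ≠ d)).tail.takeWhile (· ≠ d)) := by
  rw [pvPieces, if_neg (pvDropWhile_ne_nil d cs h)]
  simp [pvPieces_get0]

theorem pvGet1 {α : Type} (a : α) (t : List α) :
    PySem.List.pyGet? (a :: t) 1 = t[0]? := by
  have : (1 : Int) = ((1 : Nat) : Int) := rfl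
  rw [this, PySem.List.pyGet?_natCast]
  simp

theorem pvPieces_pyGet1 (d : Char) (cs : List Char) (h : d ∈ cs) :
    PySem.List.pyGet? (pvPieces d cs) 1 =
      some ((cs.dropWhile (· ≠ d)).tail.takeWhile (· ≠ d)) := by
  cases hp : pvPieces d cs with
  | nil => exact absurd hp (pvPieces_ne_nil d cs)
  | cons a t =>
    rw [pvGet1]
    have hg := pvPieces_get1 d cs h
    rw [hp] at hg
    simpa using hg

theorem pvPieces_head?D (d : Char) (cs : List Char) :
    (pvPieces d cs).head?.getD [] = cs.takeWhile (· ≠ d) := by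
  cases hp : pvPieces d cs with
  | nil => exact absurd hp (pvPieces_ne_nil d cs)
  | cons a t =>
    have hh := pvPieces_headD d cs
    rw [hp] at hh
    simpa using hh

theorem pvLineA_ne_nil (cs : List Char) : pvLineA cs ≠ [] := by
  by_cases m0 : PySem.Chars.startswith cs ['T', 'i', 't', 'l', 'e', ':'] = true
  · simp [pvLineA, m0]
  by_cases m1 : PySem.Chars.startswith cs ['C', 'a', 't', 'e', 'g', 'o', 'r', 'y', ':'] = true
  · simp [pvLineA, m0, m1]
  by_cases m2 : PySem.Chars.startswith cs ['A', 'u', 't', 'h', 'o', 'r', ':'] = true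
  · simp [pvLineA, m0, m1, m2]
  by_cases m3 : PySem.Chars.startswith cs ['S', 'u', 'm', 'm', 'a', 'r', 'y', ':'] = true
  · simp [pvLineA, m0, m1, m2, m3]
  by_cases m4 : PySem.Chars.startswith cs ['D', 'a', 't', 'e', ':'] = true
  · simp [pvLineA, m0, m1, m2, m3, m4]
  by_cases m5 : PySem.Chars.startswith cs ['T', 'a', 'g', 's', ':'] = true
  · simp [pvLineA, m0, m1, m2, m3, m4, m5]
  by_cases m6 : PySem.Chars.startswith cs ['i', 'm', 'a', 'g', 'e', ':'] = true
  · simp [pvLineA, m0, m1, m2, m3, m4, m5, m6]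
  by_cases m7 : PySem.Chars.startswith cs ['!', '['] = true
  · simp [pvLineA, m0, m1, m2, m3, m4, m5, m6, m7]
  by_cases m8 : PySem.Chars.startswith cs ['#', ' '] = true
  · simp [pvLineA, m0, m1, m2, m3, m4, m5, m6, m7, m8]
  by_cases m9 : PySem.Chars.startswith cs ['#', '#', ' '] = true
  · simp [pvLineA, m0, m1, m2, m3, m4, m5, m6, m7, m8, m9]
  by_cases m10 : PySem.Chars.startswith cs ['#', '#', '#', ' '] = true
  · simp [pvLineA, m0, m1, m2, m3, m4, m5, m6, m7, m8, m9, m10]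
  by_cases m11 : PySem.Chars.startswith cs ['#', '#', '#', '#', ' '] = true
  · simp [pvLineA, m0, m1, m2, m3, m4, m5, m6, m7, m8, m9, m10, m11]
  by_cases m12 : PySem.Chars.startswith cs ['#', '#', '#', '#', '#', ' '] = true
  · simp [pvLineA, m0, m1, m2, m3, m4, m5, m6, m7, m8, m9, m10, m11, m12]
  simp [pvLineA, m0, m1, m2, m3, m4, m5, m6, m7, m8, m9, m10, m11, m12]

-- pvRender computes the '\n'-join of A's per-line output list (under Pre_'s per-line condition)
theorem pvRender_eq (cs : List Char)
    (hpre : PySem.Chars.startswith cs ['!', '['] = true → '(' ∈ cs) :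
    pvRender cs = PySem.Chars.join ['\n'] (pvLineA cs) := by
  by_cases m1 : PySem.Chars.startswith cs ['T', 'i', 't', 'l', 'e', ':'] = true
  · simp [pvLineA, pvRender, pvMetaTable, List.find?, m1, PySem.Chars.join_singleton]
  · by_cases m2 : PySem.Chars.startswith cs ['C', 'a', 't', 'e', 'g', 'o', 'r', 'y', ':'] = true
    · simp [pvLineA, pvRender, pvMetaTable, List.find?, m1, m2, PySem.Chars.join_singleton]
    · by_cases m3 : PySem.Chars.startswith cs ['A', 'u', 't', 'h', 'o', 'r', ':'] = true
      · simp [pvLineA, pvRender, pvMetaTable, List.find?, m1, m2, m3, PySem.Chars.join_singleton]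
      · by_cases m4 : PySem.Chars.startswith cs ['S', 'u', 'm', 'm', 'a', 'r', 'y', ':'] = true
        · simp [pvLineA, pvRender, pvMetaTable, List.find?, m1, m2, m3, m4, PySem.Chars.join_singleton]
        · by_cases m5 : PySem.Chars.startswith cs ['D', 'a', 't', 'e', ':'] = true
          · simp [pvLineA, pvRender, pvMetaTable, List.find?, m1, m2, m3, m4, m5, PySem.Chars.join_singleton]
          · by_cases m6 : PySem.Chars.startswith cs ['T', 'a', 'g', 's', ':'] = true
            · simp [pvLineA, pvRender, pvMetaTable, List.find?, m1, m2, m3, m4, m5, m6, PySem.Chars.join_singleton]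
            · by_cases mi : PySem.Chars.startswith cs ['i', 'm', 'a', 'g', 'e', ':'] = true
              · simp [pvLineA, pvRender, pvMetaTable, List.find?, m1, m2, m3, m4, m5, m6, mi, PySem.Chars.join_singleton]
              · by_cases mb : PySem.Chars.startswith cs ['!', '['] = true
                · -- image markdown branch
                  have hmem : '(' ∈ cs := hpre mb
                  obtain ⟨rest, hcs⟩ : ∃ rest, cs = '!' :: '[' :: rest := by
                    obtain ⟨t, ht⟩ := (PySem.Chars.startswith_iff cs ['!', '[']).mp mb
                    exact ⟨t, by simpa using ht.symm⟩
                  simp only [pvLineA, pvRender, pvMetaTable, List.find?]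
                  simp [m1, m2, m3, m4, m5, m6, mi, mb, PySem.Chars.split?, pvSplitOn_eq_pieces,
                    PySem.Chars.join_cons_cons, PySem.Chars.join_singleton]
                  have hpath : (pvPieces ')' ((PySem.List.pyGet? (pvPieces '(' cs) 1).getD [])).head?.getD []
                      = pvUpto ['(', ')'] (List.drop (PySem.Chars.find cs ['('] + 1).toNat cs) := by
                    rw [pvPieces_pyGet1 '(' cs hmem]
                    simp only [Option.getD_some]
                    rw [pvPieces_head?D, pvUpto_eq '(' ')', pvDrop_find_succ '(' cs hmem]
                  have halt : (pvPieces ']' ((PySem.List.pyGet? (pvPieces '[' cs) 1).getD [])).head?.getD []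
                      = pvUpto ['[', ']'] (List.drop 2 cs) := by
                    rw [hcs, pvPieces_cons_ne '[' '!' _ (by decide), pvPieces_cons_self]
                    simp only [List.modifyHead]
                    rw [pvGet1]
                    simp only [pvPieces_get0, Option.getD_some]
                    rw [pvPieces_head?D, pvUpto_eq '[' ']']
                    rfl
                  rw [hpath, halt]
                · -- heading / plain branch
                  have e1 : (['#', ' '] : List Char) = List.replicate 1 '#' ++ [' '] := rfl
                  have e2 : (['#', '#', ' '] : List Char) = List.replicate 2 '#' ++ [' '] := rfl
                  have e3 : (['#', '#', '#', ' '] : List Char) = List.replicate 3 '#' ++ [' '] := rfl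
                  have e4 : (['#', '#', '#', '#', ' '] : List Char) = List.replicate 4 '#' ++ [' '] := rfl
                  have e5 : (['#', '#', '#', '#', '#', ' '] : List Char) = List.replicate 5 '#' ++ [' '] := rfl
                  simp only [pvLineA, pvRender, pvMetaTable, List.find?]
                  simp [m1, m2, m3, m4, m5, m6, mi, mb]
                  by_cases h1 : PySem.Chars.startswith cs ['#', ' '] = true
                  · obtain ⟨hn, hsp⟩ := (pvHeading_iff 1 cs).mp (e1 ▸ h1)
                    rw [if_pos h1, if_pos (by rw [hn]; exact ⟨by omega, by omega, hsp⟩)]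
                    have hs : PySem.List.slice cs (some 2) = List.drop 2 cs := by
                      rw [PySem.List.slice_from cs (a := 2) (by norm_num)]; rfl
                    simp [hs, hn, pvUnderline, PySem.Chars.join_cons_cons, PySem.Chars.join_singleton]
                  · rw [if_neg h1]
                    by_cases h2 : PySem.Chars.startswith cs ['#', '#', ' '] = true
                    · obtain ⟨hn, hsp⟩ := (pvHeading_iff 2 cs).mp (e2 ▸ h2)
                      rw [if_pos h2, if_pos (by rw [hn]; exact ⟨by omega, by omega, hsp⟩)]
                      have hs : PySem.List.slice cs (some 3) = List.drop 3 cs := by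
                        rw [PySem.List.slice_from cs (a := 3) (by norm_num)]; rfl
                      simp [hs, hn, pvUnderline, PySem.Chars.join_cons_cons, PySem.Chars.join_singleton]
                    · rw [if_neg h2]
                      by_cases h3 : PySem.Chars.startswith cs ['#', '#', '#', ' '] = true
                      · obtain ⟨hn, hsp⟩ := (pvHeading_iff 3 cs).mp (e3 ▸ h3)
                        rw [if_pos h3, if_pos (by rw [hn]; exact ⟨by omega, by omega, hsp⟩)]
                        have hs : PySem.List.slice cs (some 4) = List.drop 4 cs := by
                          rw [PySem.List.slice_from cs (a := 4) (by norm_num)]; rfl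
                        simp [hs, hn, pvUnderline, PySem.Chars.join_cons_cons, PySem.Chars.join_singleton]
                      · rw [if_neg h3]
                        by_cases h4 : PySem.Chars.startswith cs ['#', '#', '#', '#', ' '] = true
                        · obtain ⟨hn, hsp⟩ := (pvHeading_iff 4 cs).mp (e4 ▸ h4)
                          rw [if_pos h4, if_pos (by rw [hn]; exact ⟨by omega, by omega, hsp⟩)]
                          have hs : PySem.List.slice cs (some 5) = List.drop 5 cs := by
                            rw [PySem.List.slice_from cs (a := 5) (by norm_num)]; rfl
                          simp [hs, hn, pvUnderline, PySem.Chars.join_cons_cons, PySem.Chars.join_singleton]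
                        · rw [if_neg h4]
                          by_cases h5 : PySem.Chars.startswith cs ['#', '#', '#', '#', '#', ' '] = true
                          · obtain ⟨hn, hsp⟩ := (pvHeading_iff 5 cs).mp (e5 ▸ h5)
                            rw [if_pos h5, if_pos (by rw [hn]; exact ⟨by omega, by omega, hsp⟩)]
                            have hs : PySem.List.slice cs (some 6) = List.drop 6 cs := by
                              rw [PySem.List.slice_from cs (a := 6) (by norm_num)]; rfl
                            simp [hs, hn, pvUnderline, PySem.Chars.join_cons_cons, PySem.Chars.join_singleton]
                          · rw [if_neg h5]
                            have hno : ¬ (1 ≤ pvHashCount cs ∧ pvHashCount cs ≤ 5 ∧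
                                cs[pvHashCount cs]? = some ' ') := by
                              rintro ⟨ha, hb, hc⟩
                              set n := pvHashCount cs with hn
                              interval_cases n
                              · exact h1 (e1 ▸ (pvHeading_iff 1 cs).mpr ⟨hn.symm, hc⟩)
                              · exact h2 (e2 ▸ (pvHeading_iff 2 cs).mpr ⟨hn.symm, hc⟩)
                              · exact h3 (e3 ▸ (pvHeading_iff 3 cs).mpr ⟨hn.symm, hc⟩)
                              · exact h4 (e4 ▸ (pvHeading_iff 4 cs).mpr ⟨hn.symm, hc⟩)
                              · exact h5 (e5 ▸ (pvHeading_iff 5 cs).mpr ⟨hn.symm, hc⟩)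
                            rw [if_neg hno, PySem.Chars.join_singleton]

theorem pvJoin_append_of_ne_nil (sep : List Char) :
    ∀ (xs ys : List (List Char)), xs ≠ [] → ys ≠ [] →
      PySem.Chars.join sep (xs ++ ys) = PySem.Chars.join sep xs ++ sep ++ PySem.Chars.join sep ys := by
  intro xs
  induction xs with
  | nil => intro ys h _; exact absurd rfl h
  | cons a t ih =>
    intro ys _ hys
    cases t with
    | nil =>
      cases ys with
      | nil => exact absurd rfl hys
      | cons b u =>
        rw [List.singleton_append, PySem.Chars.join_cons_cons, PySem.Chars.join_singleton]
    | cons a' t' =>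
      have hx : (a :: a' :: t') ++ ys = a :: a' :: (t' ++ ys) := by simp
      rw [hx, PySem.Chars.join_cons_cons]
      have hy : a' :: (t' ++ ys) = (a' :: t') ++ ys := by simp
      rw [hy, ih ys (by simp) hys, PySem.Chars.join_cons_cons]
      simp

theorem pvFlat_ne_nil (ps : List (List Char)) (h : ps ≠ []) :
    ps.flatMap pvLineA ≠ [] := by
  cases ps with
  | nil => exact absurd rfl h
  | cons a t =>
    simp only [List.flatMap_cons, ne_eq, List.append_eq_nil_iff, not_and]
    intro ha
    exact absurd ha (pvLineA_ne_nil a)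

theorem pvStrNL : "\n".toList = ['\n'] := by decide

-- the streaming loop computes the '\n'-join of A's flattened per-line outputs
theorem pvGo_eq (n : Nat) : ∀ (cs : List Char), cs.length ≤ n →
    (∀ l ∈ pvPieces '\n' cs, PySem.Chars.startswith l ['!', '['] = true → '(' ∈ l) →
    ∀ out, pvGo out cs = out ++ PySem.Chars.join ['\n'] ((pvPieces '\n' cs).flatMap pvLineA) := by
  induction n with
  | zero =>
    intro cs hlen hpre out
    have hnil : cs = [] := by
      cases cs with
      | nil => rfl
      | cons a t => simp at hlen
    subst hnil
    rw [pvGo]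
    simp only [pvStrNL]
    have : PySem.Chars.find ([] : List Char) ['\n'] < 0 := by
      rw [pvFind_eq]; simp
    rw [if_pos this, pvPieces_nil]
    simp only [List.flatMap_cons, List.flatMap_nil, List.append_nil]
    rw [pvRender_eq [] (by intro h; simp [PySem.Chars.startswith, List.isPrefixOf] at h)]
  | succ n ihn =>
    intro cs hlen hpre out
    rw [pvGo]
    simp only [pvStrNL]
    by_cases hf : PySem.Chars.find cs ['\n'] < 0
    · -- last line: no newline left
      have hnm : '\n' ∉ cs := by
        intro hm
        rw [pvFind_eq, if_pos hm] at hf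
        omega
      have hp : pvPieces '\n' cs = [cs] := by
        rw [pvPieces, if_pos (by simp only [List.dropWhile_eq_nil_iff]; intro x hx; simp; rintro rfl; exact hnm hx)]
        congr 1
        rw [List.takeWhile_eq_self_iff]
        intro x hx; simp; rintro rfl; exact hnm hx
      rw [if_pos hf, hp]
      simp only [List.flatMap_cons, List.flatMap_nil, List.append_nil]
      rw [pvRender_eq cs (hpre cs (by rw [hp]; simp))]
    · -- a newline was found
      have hmem : '\n' ∈ cs := pvFind_mem '\n' cs hf
      have hfind0 : 0 ≤ PySem.Chars.find cs ['\n'] := by omega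
      have hL : PySem.Chars.slice cs none (some (PySem.Chars.find cs ['\n']))
          = cs.takeWhile (· ≠ '\n') := by
        rw [PySem.Chars.slice_eq_listSlice, PySem.List.slice_to _ hfind0, pvTake_find '\n' cs hmem]
      have hR : PySem.Chars.slice cs (some (PySem.Chars.find cs ['\n'] + 1)) none
          = (cs.dropWhile (· ≠ '\n')).tail := by
        rw [PySem.Chars.slice_eq_listSlice, PySem.List.slice_from _ (by omega),
          pvDrop_find_succ '\n' cs hmem]
      have hp : pvPieces '\n' cs
          = cs.takeWhile (· ≠ '\n') :: pvPieces '\n' (cs.dropWhile (· ≠ '\n')).tail := by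
        rw [pvPieces, if_neg (pvDropWhile_ne_nil '\n' cs hmem)]
      have hlenR : ((cs.dropWhile (· ≠ '\n')).tail).length ≤ n := by
        have h1 := List.length_dropWhile_le (fun c => decide (c ≠ '\n')) cs
        have h2 : 0 < (cs.dropWhile (fun c => decide (c ≠ '\n'))).length :=
          List.length_pos_of_ne_nil (pvDropWhile_ne_nil '\n' cs hmem)
        simp only [List.length_tail]
        omega
      rw [if_neg hf, hL, hR,
        ihn _ hlenR (by intro l hl; exact hpre l (by rw [hp]; exact List.mem_cons_of_mem _ hl)),
        hp]
      rw [List.flatMap_cons,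
        pvJoin_append_of_ne_nil ['\n'] _ _ (pvLineA_ne_nil _)
          (pvFlat_ne_nil _ (pvPieces_ne_nil '\n' _)),
        pvRender_eq _ (hpre _ (by rw [hp]; simp))]
      simp

-- ===== VERDICT (by name: the statement is the Claim_ definition above) =====
theorem convert_md_to_rst_spec : Claim_equal_convert_md_to_rst := by
  unfold Claim_equal_convert_md_to_rst
  intro md _hdom hpre
  unfold Spec_convert_md_to_rst convert_md_to_rst convert_md_to_rst_alt
  unfold Pre_convert_md_to_rst at hpre
  rw [PySem.List.foldl_append_eq_flatMap pvLineA]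
  have hsplit : (PySem.Chars.split? md.toList "\n".toList).getD [] = pvPieces '\n' md.toList := by
    simp [PySem.Chars.split?, pvSplitOn_eq_pieces]
  rw [hsplit] at hpre ⊢
  rw [pvGo_eq md.toList.length md.toList (le_refl _) hpre []]
  simp
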